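-- pv_equiv track=rewrite | github.com/ErikP0/arithmetic-circuits-for-spn-primitives | MP-SPDZ code/photon.py | cembed4
-- ===== SOURCE A (Python) =====
-- CEMBED_POWERS4 = [1 << 5, 1 << 10, 1 << 15, 1 << 20, 1 << 30, 1 << 35]
--
-- def cembed4(x):
--     x0,x1,x2,x3 = [(x >> i) & 0x1 for i in range(4)]
--     y0 = x0
--     y5 = x2 ^ x3
--     y10 = x2
--     y15 = x1 ^ x2 ^ x3
--     y20 = x1
--     y30 = x2
--     y35 = x1
--
--     return y0 ^ sum(p*y for p,y in zip([y5,y10,y15,y20,y30,y35], CEMBED_POWERS4))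
-- ===== SOURCE B (Python) =====
-- # Direct 16-entry lookup table indexed by the low four bits (same values for all ints,
-- # since Python's x & 0xF is the value's residue mod 16, also for negatives).
-- CEMBED_TABLE = [
--     0, 1, 34360819712, 34360819713,
--     1073775648, 1073775649, 35434529824, 35434529825,
--     32800, 32801, 34360786976, 34360786977,
--     1073742848, 1073742849, 35434562560, 35434562561,
-- ]
--
-- def cembed4(x):
--     return CEMBED_TABLE[x & 0xF]
-- ===== Notes on version B (the rewrite author's own statement) =====
-- stated objective: alternative
-- what changed: Replaces per-bit extraction, XOR combination and a weighted zip-sum with a single lookup in a precomputed 16-entry table indexed by x & 0xF.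
import Mathlib
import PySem

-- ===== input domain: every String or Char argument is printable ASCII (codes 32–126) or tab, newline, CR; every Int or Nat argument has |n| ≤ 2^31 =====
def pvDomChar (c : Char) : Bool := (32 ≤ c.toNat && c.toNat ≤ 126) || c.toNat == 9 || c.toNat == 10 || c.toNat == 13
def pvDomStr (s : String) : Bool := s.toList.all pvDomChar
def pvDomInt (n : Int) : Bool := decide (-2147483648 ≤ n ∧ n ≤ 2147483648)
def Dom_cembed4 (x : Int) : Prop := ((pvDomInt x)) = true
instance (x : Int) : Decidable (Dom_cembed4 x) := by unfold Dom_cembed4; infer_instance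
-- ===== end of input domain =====

-- B replaces the per-bit XOR/weighted-sum computation with a precomputed 16-entry lookup table (alternative decomposition, same cost).

-- ===== PORT A =====
def CEMBED_POWERS4 : List Int := [1 <<< 5, 1 <<< 10, 1 <<< 15, 1 <<< 20, 1 <<< 30, 1 <<< 35]

def cembed4 (x : Int) : Int :=
  -- x0,x1,x2,x3 = [(x >> i) & 0x1 for i in range(4)]
  let x0 := PySem.Int.band (x >>> (0 : Nat)) 1
  let x1 := PySem.Int.band (x >>> (1 : Nat)) 1
  let x2 := PySem.Int.band (x >>> (2 : Nat)) 1
  let x3 := PySem.Int.band (x >>> (3 : Nat)) 1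
  let y0 := x0
  let y5 := PySem.Int.bxor x2 x3
  let y10 := x2
  let y15 := PySem.Int.bxor (PySem.Int.bxor x1 x2) x3
  let y20 := x1
  let y30 := x2
  let y35 := x1
  -- y0 ^ sum(p*y for p,y in zip([y5,y10,y15,y20,y30,y35], CEMBED_POWERS4))
  PySem.Int.bxor y0
    (((List.zip [y5, y10, y15, y20, y30, y35] CEMBED_POWERS4).foldl
      (fun acc py => acc + py.1 * py.2) 0))

-- ===== PORT B =====
def CEMBED_TABLE : List Int :=
  [0, 1, 34360819712, 34360819713,
   1073775648, 1073775649, 35434529824, 35434529825,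
   32800, 32801, 34360786976, 34360786977,
   1073742848, 1073742849, 35434562560, 35434562561]

def cembed4_alt (x : Int) : Int :=
  PySem.List.pyGetD CEMBED_TABLE (PySem.Int.band x 15) 0

-- ===== PRECONDITION & SPEC =====
def Spec_cembed4 (x : Int) (out : Int) : Prop := out = cembed4_alt x
instance (x : Int) (out : Int) : Decidable (Spec_cembed4 x out) := by unfold Spec_cembed4; infer_instance

-- ===== CLAIM (what is proved, stated in full; the proofs are below) =====
def Claim_equal_cembed4 : Prop := ∀ (x : Int), Dom_cembed4 x → Spec_cembed4 x (cembed4 x)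

-- ===== LEMMAS AND PROOFS =====

-- Python's x & 0xF is the residue of x modulo 16 (also for negative x).
theorem band_fifteen (x : Int) : PySem.Int.band x 15 = x % 16 := by
  rcases x with n | n
  · show PySem.Int.band (n : Int) 15 = _
    simp only [PySem.Int.band]
    norm_num
    rw [show ((15:Int).toNat) = 15 from rfl, Nat.and_two_pow_sub_one_eq_mod n 4]
    omega
  · simp only [PySem.Int.band, Int.negSucc_eq]
    norm_num
    rw [if_neg (by omega : ¬((n : Int) ≤ -1)),
        show Int.toNat 15 = 15 from rfl, Nat.and_comm 15 n, Nat.and_two_pow_sub_one_eq_mod n 4]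
    omega

-- Python's y & 0x1 is y mod 2.
theorem band_one_emod (y : Int) : PySem.Int.band y 1 = y % 2 := by
  rw [PySem.Int.band_one, PySem.Int.mod, Int.fmod_eq_emod]
  norm_num

-- The low bits of x only depend on x % 16.
theorem bit_emod (x : Int) (i : Nat) (hi : i < 4) :
    PySem.Int.band (x >>> i) 1 = PySem.Int.band ((x % 16) >>> i) 1 := by
  rw [band_one_emod, band_one_emod, Int.shiftRight_eq_div_pow, Int.shiftRight_eq_div_pow]
  interval_cases i <;> norm_num <;> omega

theorem cembed4_periodic (x : Int) : cembed4 x = cembed4 (x % 16) := by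
  unfold cembed4
  rw [bit_emod x 0 (by norm_num), bit_emod x 1 (by norm_num),
      bit_emod x 2 (by norm_num), bit_emod x 3 (by norm_num)]

theorem cembed4_alt_periodic (x : Int) : cembed4_alt x = cembed4_alt (x % 16) := by
  unfold cembed4_alt
  rw [band_fifteen, band_fifteen, Int.emod_emod_of_dvd _ (by norm_num)]

-- ===== VERDICT (by name: the statement is the Claim_ definition above) =====
theorem cembed4_spec : Claim_equal_cembed4 := by
  intro x _
  show cembed4 x = cembed4_alt x
  rw [cembed4_periodic, cembed4_alt_periodic]
  have h1 : 0 ≤ x % 16 := Int.emod_nonneg x (by norm_num)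
  have h2 : x % 16 < 16 := Int.emod_lt_of_pos x (by norm_num)
  set r := x % 16 with hr
  interval_cases r <;> decide
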